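-- pv_equiv track=rewrite | github.com/Vokimtuananh/Code-PTIT- | CHẴN LẼ.py | check
-- ===== SOURCE A (Python) =====
-- def check(n):
--     a = str(n)
--     b = sum(int(d) for d in a)
--     if b % 10 != 0:
--         return False
--     for i in range(len(a) - 1):
--         if abs(int(a[i]) - int(a[i + 1])) != 2:
--             return False
--     return True
-- ===== SOURCE B (Python) =====
-- def check(n):
--     m, total = divmod(n, 10)
--     prev = total
--     while m:
--         m, d = divmod(m, 10)
--         if abs(d - prev) != 2:
--             return False
--         total += d
--         prev = d
--     return total % 10 == 0
-- ===== Notes on version B (the rewrite author's own statement) =====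
-- stated objective: alternative
-- what changed: Replaces A's string-based check (str(n), a digit-sum comprehension and an index loop over adjacent characters) by a purely arithmetic divmod loop that extracts the digits least-significant-first, threading a running total and the previous digit with early exit; correct because |a-b|=2 adjacency and the digit sum are invariant under reversing the digit order.
-- outside the precondition, e.g. on check(-5): A raises ValueError, B returns False
import Mathlib
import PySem

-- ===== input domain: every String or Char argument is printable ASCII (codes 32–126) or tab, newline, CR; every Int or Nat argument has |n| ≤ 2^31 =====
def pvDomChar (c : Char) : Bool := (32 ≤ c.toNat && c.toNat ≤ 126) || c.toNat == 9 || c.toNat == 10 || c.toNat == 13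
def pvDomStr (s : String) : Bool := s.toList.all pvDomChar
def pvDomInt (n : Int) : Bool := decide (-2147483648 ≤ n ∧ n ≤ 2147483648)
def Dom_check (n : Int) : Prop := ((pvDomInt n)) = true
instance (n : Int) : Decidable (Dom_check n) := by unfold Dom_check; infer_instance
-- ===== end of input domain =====

-- B replaces A's string-based check (str(n), two scans of the characters) by a purely
-- arithmetic divmod loop extracting the digits least-significant-first (objective: alternative).

-- ===== PORT A =====
-- int(d) for a one-character string d; Python raises on a non-digit character,
-- which happens only for negative n (the leading minus sign), excluded by Pre_check;
-- the fallback default is never reached inside Pre_.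
def pyDigit (c : Char) : Int := (PySem.Int.ofStr? (String.ofList [c])).getD 0

-- the 'for i in range(len(a) - 1)' loop with its early return False
def checkAdjA (a : List Char) : List Int → Bool
  | [] => true
  | i :: rest =>
    if (pyDigit (PySem.List.pyGetD a i ' ') - pyDigit (PySem.List.pyGetD a (i + 1) ' ')).natAbs ≠ 2 then
      false
    else checkAdjA a rest

def check (n : Int) : Bool :=
  let a := (PySem.Int.toStr n).toList
  let b := (a.map pyDigit).sum
  if PySem.Int.mod b 10 ≠ 0 then false
  else checkAdjA a (PySem.List.pyRange 0 ((a.length : Int) - 1) 1)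

-- ===== PORT B =====
-- the 'while m:' loop of Source B: m, d = divmod(m, 10); early return False on a bad pair;
-- the loop runs on a Nat because Pre_check gives 0 ≤ n (Python's divmod on nonnegative
-- arguments is exactly Nat division and remainder), which also makes it structurally decreasing.
def bLoop (m : Nat) (prev total : Int) : Bool :=
  if m = 0 then PySem.Int.mod total 10 == 0
  else
    let m' := m / 10
    let d : Int := ((m % 10 : Nat) : Int)
    if (d - prev).natAbs ≠ 2 then false
    else bLoop m' d (total + d)
decreasing_by exact Nat.div_lt_self (by omega) (by omega)

def check_alt (n : Int) : Bool :=
  -- m, total = divmod(n, 10); prev = total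
  let p := n.toNat
  let m := p / 10
  let total : Int := ((p % 10 : Nat) : Int)
  bLoop m total total

-- ===== PRECONDITION & SPEC =====
-- Pre_ excludes n < 0, where str(n) starts with '-' and int('-') raises ValueError in A.
def Pre_check (n : Int) : Prop := 0 ≤ n
instance (n : Int) : Decidable (Pre_check n) := by unfold Pre_check; infer_instance
def pvWitness_check : Int := 46

def Spec_check (n : Int) (out : Bool) : Prop := out = check_alt n
instance (n : Int) (out : Bool) : Decidable (Spec_check n out) := by unfold Spec_check; infer_instance

-- ===== CLAIM (what is proved, stated in full; the proofs are below) =====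
def Claim_equal_check : Prop := ∀ (n : Int), Dom_check n → Pre_check n → Spec_check n (check n)

-- ===== LEMMAS AND PROOFS =====

-- adjacency of consecutive elements as a chain predicate
def chainOK : List Int → Bool
  | [] => true
  | [_] => true
  | x :: y :: rest => ((y - x).natAbs == 2) && chainOK (y :: rest)

-- the character list Nat.toDigits produces, as a simple structural recursion
def digRev (m : Nat) : List Char :=
  if m < 10 then [Nat.digitChar m]
  else digRev (m / 10) ++ [Nat.digitChar (m % 10)]
decreasing_by exact Nat.div_lt_self (by omega) (by omega)

-- the digits of m, least significant first
def digsLSB (m : Nat) : List Int :=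
  if m < 10 then [(m : Int)]
  else ((m % 10 : Nat) : Int) :: digsLSB (m / 10)
decreasing_by exact Nat.div_lt_self (by omega) (by omega)

lemma heq2 {x y : Int} (h : (x - y).natAbs = 2) : ((y - x).natAbs == 2) = true := by
  simp; omega

lemma hne2 {x y : Int} (h : ¬ (x - y).natAbs = 2) : ((y - x).natAbs == 2) = false := by
  simp; omega

lemma checkAdjA_eq_chainOK (a : List Char) :
    ∀ (m k : Nat), a.length - k = m → k ≤ a.length →
      checkAdjA a (PySem.List.pyRange (k : Int) ((a.length : Int) - 1) 1) =
        chainOK ((a.drop k).map pyDigit) := by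
  intro m
  induction m with
  | zero =>
    intro k hm hk
    have hk' : k = a.length := by omega
    subst hk'
    rw [PySem.List.pyRange_one_eq_nil (by omega)]
    simp [checkAdjA, chainOK]
  | succ m ih =>
    intro k hm hk
    have hlt : k < a.length := by omega
    rw [List.drop_eq_getElem_cons hlt]
    by_cases hlast : k + 1 = a.length
    · rw [PySem.List.pyRange_one_eq_nil (by omega)]
      have : a.drop (k + 1) = [] := by simp; omega
      simp [this, checkAdjA, chainOK]
    · have hlt2 : k + 1 < a.length := by omega
      rw [PySem.List.pyRange_one_cons (by omega)]
      rw [List.drop_eq_getElem_cons hlt2]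
      have hc : ((k : Int) + 1) = ((k + 1 : Nat) : Int) := by push_cast; ring
      have g1 : PySem.List.pyGetD a (k : Int) ' ' = a[k] := by
        rw [PySem.List.pyGetD_natCast]
        exact List.getD_eq_getElem a ' ' hlt
      have g2 : PySem.List.pyGetD a ((k : Int) + 1) ' ' = a[k + 1] := by
        rw [hc, PySem.List.pyGetD_natCast]
        exact List.getD_eq_getElem a ' ' hlt2
      show checkAdjA a ((k : Int) :: _) = _
      rw [checkAdjA, g1, g2]
      by_cases h : (pyDigit a[k] - pyDigit a[k + 1]).natAbs = 2
      · rw [if_neg (by simp [h])]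
        rw [hc, ih (k + 1) (by omega) (by omega), List.drop_eq_getElem_cons hlt2]
        simp only [List.map_cons]
        conv_rhs => rw [chainOK]
        rw [heq2 h, Bool.true_and]
      · rw [if_pos h]
        simp only [List.map_cons]
        rw [chainOK, hne2 h]
        simp

-- A's check, stated as chain-and-sum over the character list of str(n)
lemma check_eq_chain_sum (n : Int) :
    check n = (chainOK (((PySem.Int.toStr n).toList).map pyDigit)
      && (PySem.Int.mod ((((PySem.Int.toStr n).toList).map pyDigit).sum) 10 == 0)) := by
  unfold check
  set a := (PySem.Int.toStr n).toList with ha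
  have hadj := checkAdjA_eq_chainOK a (a.length) 0 (by omega) (by omega)
  simp only [Nat.cast_zero, List.drop_zero] at hadj
  show (if PySem.Int.mod ((a.map pyDigit).sum) 10 ≠ 0 then false
        else checkAdjA a (PySem.List.pyRange 0 ((a.length : Int) - 1) 1)) = _
  rw [hadj]
  by_cases h : PySem.Int.mod ((a.map pyDigit).sum) 10 = 0
  · have hd : (10 : Int) ∣ (a.map pyDigit).sum := (PySem.Int.mod_eq_zero_iff_dvd _ 10).mp h
    rw [if_neg (by simpa using hd)]
    simp [hd]
  · have hd : ¬ (10 : Int) ∣ (a.map pyDigit).sum :=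
      fun d => h ((PySem.Int.mod_eq_zero_iff_dvd _ 10).mpr d)
    rw [if_pos h]
    simp [hd]

-- Nat.toDigitsCore with enough fuel is digRev
lemma toDigitsCore_eq_digRev :
    ∀ (f m : Nat) (l : List Char), m < f →
      Nat.toDigitsCore 10 f m l = digRev m ++ l := by
  intro f
  induction f with
  | zero => intro m l h; omega
  | succ f ih =>
    intro m l h
    rw [Nat.toDigitsCore]
    by_cases h0 : m / 10 = 0
    · have hm : m < 10 := by omega
      have : m % 10 = m := Nat.mod_eq_of_lt hm
      simp only [h0, if_pos, this]
      rw [digRev, if_pos hm]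
      simp
    · have hm : ¬ m < 10 := by omega
      rw [if_neg h0]
      rw [ih (m / 10) _ (by have := Nat.div_lt_self (by omega : 0 < m) (by omega : 1 < 10); omega)]
      conv_rhs => rw [digRev, if_neg hm]
      simp

lemma toDigits_eq_digRev (m : Nat) : Nat.toDigits 10 m = digRev m := by
  rw [Nat.toDigits, toDigitsCore_eq_digRev (m + 1) m [] (by omega)]
  simp

lemma pyDigit_digitChar (d : Nat) (hd : d < 10) : pyDigit (Nat.digitChar d) = (d : Int) := by
  interval_cases d <;> decide

-- the digits A reads off str(n) are the reversed LSB-first digits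
lemma map_pyDigit_digRev (m : Nat) :
    (digRev m).map pyDigit = (digsLSB m).reverse := by
  by_cases hm : m < 10
  · rw [digRev, if_pos hm, digsLSB, if_pos hm]
    simp [pyDigit_digitChar m hm]
  · rw [digRev, if_neg hm, digsLSB, if_neg hm]
    have := map_pyDigit_digRev (m / 10)
    simp [this, pyDigit_digitChar (m % 10) (Nat.mod_lt _ (by omega))]
decreasing_by exact Nat.div_lt_self (by omega) (by omega)

-- chainOK as Mathlib's Chain'
lemma chainOK_iff_chain (l : List Int) :
    chainOK l = true ↔ l.IsChain (fun a b => (b - a).natAbs = 2) := by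
  induction l with
  | nil => simp [chainOK]
  | cons x t ih =>
    cases t with
    | nil => simp [chainOK]
    | cons y r =>
      rw [chainOK, List.isChain_cons_cons, ← ih]
      simp [and_comm]

lemma chainOK_reverse (l : List Int) : chainOK l.reverse = chainOK l := by
  rcases h : chainOK l with _ | _ <;> rcases h' : chainOK l.reverse with _ | _ <;> try rfl
  · exfalso
    have h2 := (chainOK_iff_chain l.reverse).mp h'
    rw [List.isChain_reverse] at h2
    have h3 : l.IsChain (fun a b => (b - a).natAbs = 2) :=
      h2.imp (fun a b hab => by omega)
    rw [← chainOK_iff_chain] at h3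
    simp [h] at h3
  · exfalso
    have h2 := (chainOK_iff_chain l).mp h
    have h3 : l.reverse.IsChain (fun a b => (b - a).natAbs = 2) := by
      rw [List.isChain_reverse]
      exact h2.imp (fun a b hab => by omega)
    rw [← chainOK_iff_chain] at h3
    simp [h'] at h3

-- B's loop, characterised for a nonzero remaining value
lemma bLoop_pos (m : Nat) (hm : m ≠ 0) : ∀ (prev total : Int),
    bLoop m prev total =
      (chainOK (prev :: digsLSB m)
        && (PySem.Int.mod (total + (digsLSB m).sum) 10 == 0)) := by
  induction m using Nat.strong_induction_on with
  | _ m ih =>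
    intro prev total
    rw [bLoop, if_neg hm]
    by_cases hsm : m < 10
    · have hmod : m % 10 = m := Nat.mod_eq_of_lt hsm
      have hdiv : m / 10 = 0 := Nat.div_eq_of_lt hsm
      rw [digsLSB, if_pos hsm]
      simp only [hmod, hdiv]
      by_cases hpair : (((m : Nat) : Int) - prev).natAbs = 2
      · rw [if_neg (by simp [hpair]), bLoop, if_pos rfl]
        simp [chainOK, hpair]
      · rw [if_pos hpair]
        rw [chainOK]
        have : ((((m : Nat) : Int) - prev).natAbs == 2) = false := by simp [hpair]
        rw [this]
        simp
    · rw [digsLSB, if_neg hsm]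
      by_cases hpair : ((((m % 10 : Nat) : Int)) - prev).natAbs = 2
      · rw [if_neg (by push_cast at hpair; simp [hpair])]
        have hne : m / 10 ≠ 0 := by
          intro h; have := Nat.div_eq_of_lt (show m < 10 by omega); omega
        rw [ih (m / 10) (Nat.div_lt_self (by omega) (by omega)) hne]
        rw [chainOK]
        have hp : (((((m % 10 : Nat) : Int)) - prev).natAbs == 2) = true := by
          simp only [beq_iff_eq]; push_cast at hpair ⊢; exact hpair
        rw [hp]
        simp only [List.sum_cons, Bool.true_and]
        have : total + (((m % 10 : Nat) : Int) + (digsLSB (m / 10)).sum)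
            = total + ((m % 10 : Nat) : Int) + (digsLSB (m / 10)).sum := by ring
        rw [this]
      · rw [if_pos hpair]
        rw [chainOK]
        have hp : (((((m % 10 : Nat) : Int)) - prev).natAbs == 2) = false := by
          simp only [beq_eq_false_iff_ne, ne_eq]; push_cast at hpair ⊢; exact hpair
        rw [hp]
        simp

-- digsLSB of p in terms of a first divmod step, for p ≥ 10
lemma digsLSB_step (p : Nat) (hp : ¬ p < 10) :
    digsLSB p = ((p % 10 : Nat) : Int) :: digsLSB (p / 10) := by
  rw [digsLSB, if_neg hp]

-- ===== VERDICT (by name: the statement is the Claim_ definition above) =====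
theorem check_spec : Claim_equal_check := by
  intro n _ hpre
  unfold Pre_check at hpre
  unfold Spec_check check_alt
  rw [check_eq_chain_sum]
  have htoc : (PySem.Int.toStr n).toList = Nat.toDigits 10 n.toNat := by
    rw [PySem.Int.toList_toStr, PySem.Int.toChars, if_neg (by omega)]
  rw [htoc, toDigits_eq_digRev, map_pyDigit_digRev]
  rw [chainOK_reverse, List.sum_reverse]
  set p := n.toNat with hp
  by_cases hsm : p < 10
  · have hdiv : p / 10 = 0 := Nat.div_eq_of_lt hsm
    have hmod : p % 10 = p := Nat.mod_eq_of_lt hsm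
    rw [digsLSB, if_pos hsm]
    simp only [hdiv, hmod]
    rw [bLoop, if_pos rfl]
    simp [chainOK]
  · have hne : p / 10 ≠ 0 := by
      intro h; have := Nat.div_eq_of_lt (show p < 10 by omega); omega
    rw [bLoop_pos (p / 10) hne]
    rw [digsLSB_step p hsm]
    simp only [List.sum_cons]
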